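-- pv_equiv track=rewrite | github.com/MarcoSeri/MarcoSeri | src/practica3.py | encuentra_camino_cerrado
-- ===== SOURCE A (Python) =====
-- def encuentra_camino_cerrado(grafo_lista, nodo):
--     vertices, aristas = grafo_lista
--
--     for inicio, fin in aristas:
--         if nodo == inicio:
--             return [nodo,fin,nodo]
--         elif nodo == fin:
--             return [nodo,inicio,nodo]
--
--     return []
--
--     '''
--     Ejemplo Entrada:
--         (['a','b','c','d','e','f'],[('a','b'),('a','d'),('b','d'),('b','c'),('c','d'),('c','e'),('d','e'),('c','f')])
-- 	a
--     Ejemplo retorno: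
--         ['a','b','c','d','a']
--     '''
--     pass
-- ===== SOURCE B (Python) =====
-- def encuentra_camino_cerrado(grafo_lista, nodo):
--     vertices, aristas = grafo_lista
--     adj = {}
--     for inicio, fin in aristas:
--         adj.setdefault(inicio, []).append(fin)
--         adj.setdefault(fin, []).append(inicio)
--     vecinos = adj.get(nodo, [])
--     if vecinos:
--         return [nodo, vecinos[0], nodo]
--     return []
-- ===== Notes on version B (the rewrite author's own statement) =====
-- stated objective: alternative
-- what changed: Replaces A's short-circuiting scan over the edge list with building a full adjacency dict in edge order and reading the node's first recorded neighbor.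
import Mathlib
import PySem

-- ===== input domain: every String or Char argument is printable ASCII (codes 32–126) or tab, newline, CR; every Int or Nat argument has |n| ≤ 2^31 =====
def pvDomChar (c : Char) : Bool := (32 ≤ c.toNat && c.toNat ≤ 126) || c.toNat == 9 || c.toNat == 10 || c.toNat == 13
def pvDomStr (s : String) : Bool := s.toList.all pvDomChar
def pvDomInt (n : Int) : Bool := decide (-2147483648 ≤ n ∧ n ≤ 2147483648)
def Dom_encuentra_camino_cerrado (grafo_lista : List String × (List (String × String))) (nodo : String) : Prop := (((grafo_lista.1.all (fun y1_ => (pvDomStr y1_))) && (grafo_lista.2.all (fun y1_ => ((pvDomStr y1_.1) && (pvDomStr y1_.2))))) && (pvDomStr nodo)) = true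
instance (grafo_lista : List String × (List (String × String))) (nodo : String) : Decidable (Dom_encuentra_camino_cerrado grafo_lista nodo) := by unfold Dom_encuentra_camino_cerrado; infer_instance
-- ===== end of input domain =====

-- B builds an adjacency dict over all edges and reads the node's first neighbor,
-- instead of A's short-circuiting scan of the edge list (objective: alternative).

-- ===== PORT A =====
-- the for-loop with early return, as structural recursion over the edge list
def pvScanA (nodo : String) : List (String × String) → List String
  | [] => []
  | (inicio, fin) :: rest =>
      if nodo = inicio then [nodo, fin, nodo]
      else if nodo = fin then [nodo, inicio, nodo]
      else pvScanA nodo rest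

def encuentra_camino_cerrado (grafo_lista : List String × (List (String × String))) (nodo : String) : List String :=
  pvScanA nodo grafo_lista.2

-- ===== PORT B =====
-- adj.setdefault(k, []).append(v)  ==  adj[k] = adj.get(k, []) + [v]  ==  Dict.modify k [] (· ++ [v])
def pvBuildAdj (aristas : List (String × String)) : PySem.Dict String (List String) :=
  aristas.foldl
    (fun d e => (d.modify e.1 [] (· ++ [e.2])).modify e.2 [] (· ++ [e.1]))
    PySem.Dict.empty

def encuentra_camino_cerrado_alt (grafo_lista : List String × (List (String × String))) (nodo : String) : List String :=
  let adj := pvBuildAdj grafo_lista.2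
  match adj.getD nodo [] with
  | [] => []
  | v :: _ => [nodo, v, nodo]

-- ===== PRECONDITION & SPEC =====
def Spec_encuentra_camino_cerrado (grafo_lista : List String × (List (String × String))) (nodo : String) (out : List String) : Prop := out = encuentra_camino_cerrado_alt grafo_lista nodo
instance (grafo_lista : List String × (List (String × String))) (nodo : String) (out : List String) : Decidable (Spec_encuentra_camino_cerrado grafo_lista nodo out) := by unfold Spec_encuentra_camino_cerrado; infer_instance

-- ===== CLAIM (what is proved, stated in full; the proofs are below) =====
def Claim_equal_encuentra_camino_cerrado : Prop := ∀ (grafo_lista : List String × (List (String × String))) (nodo : String), Dom_encuentra_camino_cerrado grafo_lista nodo → Spec_encuentra_camino_cerrado grafo_lista nodo (encuentra_camino_cerrado grafo_lista nodo)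

-- ===== LEMMAS AND PROOFS =====

-- the neighbors an edge contributes to nodo's adjacency list, in B's append order
def pvContrib (nodo : String) (e : String × String) : List String :=
  (if nodo = e.1 then [e.2] else []) ++ (if nodo = e.2 then [e.1] else [])

theorem pvBuildAdj_getD (nodo : String) :
    ∀ (l : List (String × String)) (d : PySem.Dict String (List String)),
      (l.foldl (fun d e => (d.modify e.1 [] (· ++ [e.2])).modify e.2 [] (· ++ [e.1])) d).getD nodo []
        = d.getD nodo [] ++ l.flatMap (pvContrib nodo) := by
  intro l
  induction l with
  | nil => intro d; simp
  | cons e rest ih =>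
      intro d
      simp only [List.foldl_cons, List.flatMap_cons, ih, pvContrib,
        PySem.Dict.getD_modify]
      by_cases h1 : nodo = e.1 <;> by_cases h2 : nodo = e.2 <;>
        subst_vars <;> simp_all

theorem pvScanA_eq (nodo : String) :
    ∀ l : List (String × String),
      pvScanA nodo l =
        match l.flatMap (pvContrib nodo) with
        | [] => []
        | v :: _ => [nodo, v, nodo] := by
  intro l
  induction l with
  | nil => simp [pvScanA]
  | cons e rest ih =>
      obtain ⟨i, f⟩ := e
      simp only [List.flatMap_cons, pvScanA, pvContrib]
      by_cases h1 : nodo = i <;> by_cases h2 : nodo = f <;> subst_vars <;> simp_all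

-- ===== VERDICT (by name: the statement is the Claim_ definition above) =====
theorem encuentra_camino_cerrado_spec : Claim_equal_encuentra_camino_cerrado := by
  intro g nodo _
  unfold Spec_encuentra_camino_cerrado encuentra_camino_cerrado encuentra_camino_cerrado_alt pvBuildAdj
  rw [pvScanA_eq]
  dsimp only
  rw [pvBuildAdj_getD]
  simp
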